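-- pv_equiv track=rewrite | github.com/pilikov/NewType | src/crawlers/myfonts_api.py | _extract_scripts
-- ===== SOURCE A (Python) =====
-- from typing import Any
--
-- _SCRIPT_HINTS = {
--     "latin": "Latin",
--     "cyrillic": "Cyrillic",
--     "greek": "Greek",
--     "arabic": "Arabic",
--     "hebrew": "Hebrew",
--     "devanagari": "Devanagari",
--     "thai": "Thai",
--     "hangul": "Hangul",
--     "japanese": "Japanese",
--     "chinese": "Chinese",
--     "korean": "Korean",
-- }
--
-- _SCRIPT_ORDER = [
--     "Latin",
--     "Cyrillic",
--     "Greek",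
--     "Arabic",
--     "Hebrew",
--     "Devanagari",
--     "Thai",
--     "Japanese",
--     "Korean",
--     "Chinese",
-- ]
--
-- def _extract_scripts(product: dict[str, Any]) -> list[str]:
--     tags = product.get("tags") or []
--     if isinstance(tags, str):
--         tags = [tags]
--     normalized_tags = " ".join(str(t).lower() for t in tags)
--
--     found: list[str] = []
--     for needle, label in _SCRIPT_HINTS.items():
--         if needle in normalized_tags:
--             found.append(label)
--     return _ordered_unique_scripts(found)
--
-- def _ordered_unique_scripts(values: list[str]) -> list[str]:
--     seen: set[str] = set()
--     canonical: list[str] = []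
--     for value in values:
--         normalized = str(value or "").strip()
--         if not normalized:
--             continue
--         # normalize to canonical labels from order table
--         label = next((s for s in _SCRIPT_ORDER if s.lower() == normalized.lower()), normalized)
--         key = label.lower()
--         if key in seen:
--             continue
--         seen.add(key)
--         canonical.append(label)
--
--     order_index = {name: idx for idx, name in enumerate(_SCRIPT_ORDER)}
--     return sorted(canonical, key=lambda v: order_index.get(v, len(_SCRIPT_ORDER)))
-- ===== SOURCE B (Python) =====
-- _SCRIPT_HINTS = {
--     "latin": "Latin",
--     "cyrillic": "Cyrillic",
--     "greek": "Greek",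
--     "arabic": "Arabic",
--     "hebrew": "Hebrew",
--     "devanagari": "Devanagari",
--     "thai": "Thai",
--     "hangul": "Hangul",
--     "japanese": "Japanese",
--     "chinese": "Chinese",
--     "korean": "Korean",
-- }
--
-- _SCRIPT_ORDER = [
--     "Latin",
--     "Cyrillic",
--     "Greek",
--     "Arabic",
--     "Hebrew",
--     "Devanagari",
--     "Thai",
--     "Japanese",
--     "Korean",
--     "Chinese",
-- ]
--
-- def _extract_scripts(product):
--     tags = product.get("tags") or []
--     if isinstance(tags, str):
--         tags = [tags]
--     normalized_tags = " ".join(str(t).lower() for t in tags)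
--     # one order-guided pass: emit each canonical label (order table, then the
--     # remaining hint labels) iff its needle occurs in the normalized tag string
--     needle_of = {label: needle for needle, label in _SCRIPT_HINTS.items()}
--     ordering = _SCRIPT_ORDER + [v for v in _SCRIPT_HINTS.values() if v not in _SCRIPT_ORDER]
--     return [label for label in ordering if needle_of[label] in normalized_tags]
-- ===== Notes on version B (the rewrite author's own statement) =====
-- stated objective: simpler
-- what changed: A collects matched labels in hint order, then canonicalises/dedups them in a helper and sorts by an order-index dict; B inlines everything into a single pass over a fixed canonical ordering (_SCRIPT_ORDER plus the remaining hint labels), emitting each label iff its needle occurs in the normalized tag string.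
import Mathlib
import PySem

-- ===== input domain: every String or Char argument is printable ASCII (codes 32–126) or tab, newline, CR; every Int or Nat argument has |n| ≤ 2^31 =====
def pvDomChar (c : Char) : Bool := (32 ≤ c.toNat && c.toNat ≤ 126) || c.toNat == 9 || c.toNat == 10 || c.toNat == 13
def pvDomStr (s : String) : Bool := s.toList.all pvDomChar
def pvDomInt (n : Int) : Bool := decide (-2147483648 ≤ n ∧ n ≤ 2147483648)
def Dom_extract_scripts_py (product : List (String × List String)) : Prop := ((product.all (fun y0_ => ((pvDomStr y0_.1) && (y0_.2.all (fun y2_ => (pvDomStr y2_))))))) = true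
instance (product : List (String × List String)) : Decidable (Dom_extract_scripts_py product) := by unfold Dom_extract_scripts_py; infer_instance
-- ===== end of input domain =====

-- B replaces A's collect-then-sort-by-index (plus the _ordered_unique_scripts
-- canonicalisation helper) by a single order-guided filter pass; objective: simpler.

-- shared module constants (_SCRIPT_HINTS as an insertion-ordered assoc list, _SCRIPT_ORDER)
def pvHints : List (String × String) :=
  [("latin", "Latin"), ("cyrillic", "Cyrillic"), ("greek", "Greek"), ("arabic", "Arabic"),
   ("hebrew", "Hebrew"), ("devanagari", "Devanagari"), ("thai", "Thai"), ("hangul", "Hangul"),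
   ("japanese", "Japanese"), ("chinese", "Chinese"), ("korean", "Korean")]

def pvOrder : List String :=
  ["Latin", "Cyrillic", "Greek", "Arabic", "Hebrew", "Devanagari", "Thai",
   "Japanese", "Korean", "Chinese"]

-- ===== PORT A =====
-- helper _ordered_unique_scripts, step for step
def pvOrderedUnique (values : List String) : List String :=
  let st := values.foldl
    (fun (acc : PySem.Set String × List String) value =>
      -- normalized = str(value or "").strip()  (value is a str here; `value or ""` keeps it)
      let normalized := PySem.Str.strip (if value == "" then "" else value)
      if normalized == "" then acc
      else
        -- label = next((s for s in _SCRIPT_ORDER if s.lower() == normalized.lower()), normalized)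
        let label := (pvOrder.find? (fun s => PySem.Str.lower s == PySem.Str.lower normalized)).getD normalized
        let key := PySem.Str.lower label
        if PySem.Set.contains acc.1 key then acc
        else (PySem.Set.add acc.1 key, acc.2 ++ [label]))
    (PySem.Set.empty, [])
  -- order_index = {name: idx for idx, name in enumerate(_SCRIPT_ORDER)}
  let orderIndex : PySem.Dict String Int :=
    ((PySem.List.enumerate pvOrder).foldl (fun d p => PySem.Dict.insert d p.2 p.1) PySem.Dict.empty)
  -- sorted(canonical, key=lambda v: order_index.get(v, len(_SCRIPT_ORDER)))
  PySem.List.sorted st.2 (fun v => PySem.Dict.getD orderIndex v (10 : Int)) false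

def extract_scripts_py (product : List (String × List String)) : List String :=
  -- tags = product.get("tags") or []  (first-match dict lookup; `or []` maps None/[] to []);
  -- the isinstance(tags, str) branch cannot fire for the typed input and is not ported
  let tags := ((product.find? (fun p => p.1 == "tags")).map Prod.snd).getD []
  let normalizedTags := PySem.Str.join " " (tags.map (fun t => PySem.Str.lower t))
  let found := pvHints.foldl
    (fun (acc : List String) p => if PySem.Str.isIn p.1 normalizedTags then acc ++ [p.2] else acc) []
  pvOrderedUnique found

-- ===== PORT B =====
def extract_scripts_py_alt (product : List (String × List String)) : List String :=
  let tags := ((product.find? (fun p => p.1 == "tags")).map Prod.snd).getD []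
  let normalizedTags := PySem.Str.join " " (tags.map (fun t => PySem.Str.lower t))
  -- needle_of = {label: needle for needle, label in _SCRIPT_HINTS.items()}
  let needleOf : PySem.Dict String String :=
    pvHints.foldl (fun d p => PySem.Dict.insert d p.2 p.1) PySem.Dict.empty
  -- ordering = _SCRIPT_ORDER + [v for v in _SCRIPT_HINTS.values() if v not in _SCRIPT_ORDER]
  let ordering := pvOrder ++ (pvHints.map Prod.snd).filter (fun v => !(pvOrder.contains v))
  -- [label for label in ordering if needle_of[label] in normalized_tags]
  ordering.filter (fun l => PySem.Str.isIn (PySem.Dict.getD needleOf l "") normalizedTags)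

-- ===== PRECONDITION & SPEC =====
def Spec_extract_scripts_py (product : List (String × List String)) (out : List String) : Prop := out = extract_scripts_py_alt product
instance (product : List (String × List String)) (out : List String) : Decidable (Spec_extract_scripts_py product out) := by unfold Spec_extract_scripts_py; infer_instance

-- ===== CLAIM (what is proved, stated in full; the proofs are below) =====
def Claim_equal_extract_scripts_py : Prop := ∀ (product : List (String × List String)), Dom_extract_scripts_py product → Spec_extract_scripts_py product (extract_scripts_py product)

-- ===== LEMMAS AND PROOFS =====

-- mask: tabulates the 11 substring tests so the tail equality becomes a finite boolean fact
def pvMask (b1 b2 b3 b4 b5 b6 b7 b8 b9 b10 b11 : Bool) (n : String) : Bool :=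
  if n == "latin" then b1 else if n == "cyrillic" then b2 else if n == "greek" then b3
  else if n == "arabic" then b4 else if n == "hebrew" then b5 else if n == "devanagari" then b6
  else if n == "thai" then b7 else if n == "hangul" then b8 else if n == "japanese" then b9
  else if n == "chinese" then b10 else b11

theorem pv_key : ∀ (b1 b2 b3 b4 b5 b6 b7 b8 b9 b10 b11 : Bool),
    pvOrderedUnique (List.map Prod.snd (List.filter (fun p => pvMask b1 b2 b3 b4 b5 b6 b7 b8 b9 b10 b11 p.1) pvHints)) =
    List.filter
      (fun l => pvMask b1 b2 b3 b4 b5 b6 b7 b8 b9 b10 b11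
        ((List.foldl (fun d p => d.insert p.2 p.1) PySem.Dict.empty pvHints).getD l ""))
      (pvOrder ++ List.filter (fun v => !pvOrder.contains v) (List.map Prod.snd pvHints)) := by
  decide

theorem pv_tail_eq (s : String) :
    pvOrderedUnique (pvHints.foldl
      (fun (acc : List String) p => if PySem.Str.isIn p.1 s then acc ++ [p.2] else acc) []) =
    (pvOrder ++ (pvHints.map Prod.snd).filter (fun v => !(pvOrder.contains v))).filter
      (fun l => PySem.Str.isIn
        (PySem.Dict.getD (pvHints.foldl (fun d p => PySem.Dict.insert d p.2 p.1) PySem.Dict.empty) l "") s) := by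
  rw [PySem.List.foldl_append_if (fun p => PySem.Str.isIn p.1 s) Prod.snd, List.nil_append]
  rw [List.filter_congr (l := pvHints)
      (q := fun p => pvMask (PySem.Str.isIn "latin" s) (PySem.Str.isIn "cyrillic" s)
        (PySem.Str.isIn "greek" s) (PySem.Str.isIn "arabic" s) (PySem.Str.isIn "hebrew" s)
        (PySem.Str.isIn "devanagari" s) (PySem.Str.isIn "thai" s) (PySem.Str.isIn "hangul" s)
        (PySem.Str.isIn "japanese" s) (PySem.Str.isIn "chinese" s) (PySem.Str.isIn "korean" s) p.1)
      (by intro p hp; fin_cases hp <;> rfl)]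
  rw [List.filter_congr
      (q := fun l => pvMask (PySem.Str.isIn "latin" s) (PySem.Str.isIn "cyrillic" s)
        (PySem.Str.isIn "greek" s) (PySem.Str.isIn "arabic" s) (PySem.Str.isIn "hebrew" s)
        (PySem.Str.isIn "devanagari" s) (PySem.Str.isIn "thai" s) (PySem.Str.isIn "hangul" s)
        (PySem.Str.isIn "japanese" s) (PySem.Str.isIn "chinese" s) (PySem.Str.isIn "korean" s)
        ((List.foldl (fun d p => d.insert p.2 p.1) PySem.Dict.empty pvHints).getD l ""))
      (by intro l hl; fin_cases hl <;> rfl)]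
  exact pv_key _ _ _ _ _ _ _ _ _ _ _

-- ===== VERDICT (by name: the statement is the Claim_ definition above) =====
theorem extract_scripts_py_spec : Claim_equal_extract_scripts_py := by
  intro product _
  unfold Spec_extract_scripts_py extract_scripts_py extract_scripts_py_alt
  exact pv_tail_eq _
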